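-- pv_equiv track=rewrite | github.com/benz0id/kadoch_pipeline_tools | utils/utils.py | combine_cmds
-- ===== SOURCE A (Python) =====
-- from typing import List, Dict, Union, Any, Tuple
--
-- def combine_cmds(cmds: List[str], num_per: int) -> List[str]:
--     """
--     Divides the cmds into (len(cmds) // num_per + 1) combined cmds,
--     where each cmd contains at most <num_per> of the original commands.
--     :param cmds: A list of commands.
--     :param num_per: The number of cmds to assign to each job.
--     :return: A list of jobs that will execute all cmds.
--     """
--     combined_cmds = []
--     to_exec = []
--     for cmd in cmds:
--         to_exec.append(cmd)
--         if len(to_exec) == num_per: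
--             combined_cmds.append('\n'.join(to_exec))
--             to_exec = []
--     if to_exec:
--         combined_cmds.append('\n'.join(to_exec))
--     return combined_cmds
-- ===== SOURCE B (Python) =====
-- def combine_cmds(cmds, num_per):
--     # No positive chunk size: everything goes into a single job (empty input -> no jobs).
--     if num_per <= 0:
--         return ['\n'.join(cmds)] if cmds else []
--     return ['\n'.join(cmds[i:i + num_per]) for i in range(0, len(cmds), num_per)]
-- ===== Notes on version B (the rewrite author's own statement) =====
-- stated objective: simpler
-- what changed: Replaces the element-by-element accumulator/flush-buffer loop with index slicing: one comprehension over chunk start indices joining cmds[i:i+num_per], plus an explicit single-job case for non-positive num_per.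
import Mathlib
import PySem

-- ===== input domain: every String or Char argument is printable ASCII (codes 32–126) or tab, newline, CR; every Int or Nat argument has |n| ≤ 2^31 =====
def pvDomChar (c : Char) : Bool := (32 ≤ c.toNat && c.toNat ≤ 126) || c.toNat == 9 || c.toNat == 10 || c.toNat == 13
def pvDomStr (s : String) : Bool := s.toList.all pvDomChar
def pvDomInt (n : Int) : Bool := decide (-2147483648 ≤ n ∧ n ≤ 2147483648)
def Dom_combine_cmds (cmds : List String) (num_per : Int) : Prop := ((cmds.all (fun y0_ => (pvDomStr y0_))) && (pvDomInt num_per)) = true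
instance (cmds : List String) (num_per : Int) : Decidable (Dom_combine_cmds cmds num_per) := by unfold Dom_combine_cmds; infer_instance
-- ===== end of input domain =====

-- B replaces A's accumulator/flush-buffer loop by slicing at chunk start indices (objective: simpler).

-- ===== PORT A =====
-- the body of A's for-loop: append cmd to the buffer, flush when it reaches num_per
def combineStep (num_per : Int) (s : List String × List String) (cmd : String) :
    List String × List String :=
  let to_exec := s.2 ++ [cmd]
  if (to_exec.length : Int) = num_per then (s.1 ++ [PySem.Str.join "\n" to_exec], [])
  else (s.1, to_exec)

def combine_cmds (cmds : List String) (num_per : Int) : List String :=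
  let st := cmds.foldl (combineStep num_per) ([], [])
  if st.2.isEmpty then st.1 else st.1 ++ [PySem.Str.join "\n" st.2]

-- ===== PORT B =====
def combine_cmds_alt (cmds : List String) (num_per : Int) : List String :=
  if num_per ≤ 0 then
    if cmds.isEmpty then [] else [PySem.Str.join "\n" cmds]
  else
    (PySem.List.pyRange 0 (cmds.length : Int) num_per).map
      (fun i => PySem.Str.join "\n" (PySem.List.slice cmds (some i) (some (i + num_per))))

-- ===== PRECONDITION & SPEC =====
def Spec_combine_cmds (cmds : List String) (num_per : Int) (out : List String) : Prop := out = combine_cmds_alt cmds num_per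
instance (cmds : List String) (num_per : Int) (out : List String) : Decidable (Spec_combine_cmds cmds num_per out) := by unfold Spec_combine_cmds; infer_instance

-- ===== CLAIM (what is proved, stated in full; the proofs are below) =====
def Claim_equal_combine_cmds : Prop := ∀ (cmds : List String) (num_per : Int), Dom_combine_cmds cmds num_per → Spec_combine_cmds cmds num_per (combine_cmds cmds num_per)

-- ===== LEMMAS AND PROOFS =====

-- reference chunking: chunks of size n+1, front to back
def chunksRec (n : Nat) : List String → List String
  | [] => []
  | c :: cs => PySem.Str.join "\n" ((c :: cs).take (n + 1)) :: chunksRec n (cs.drop n)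
termination_by cmds => cmds.length
decreasing_by simp only [List.length_drop, List.length_cons]; omega

theorem chunksRec_nil (n : Nat) : chunksRec n [] = [] := by simp [chunksRec]

theorem chunksRec_cons (n : Nat) (c : String) (cs : List String) :
    chunksRec n (c :: cs) =
      PySem.Str.join "\n" ((c :: cs).take (n + 1)) :: chunksRec n (cs.drop n) := by
  rw [chunksRec]

-- A's loop with non-positive num_per never flushes
theorem loop_nonpos (num_per : Int) (h : num_per ≤ 0) (xs : List String) :
    ∀ acc buf, xs.foldl (combineStep num_per) (acc, buf) = (acc, buf ++ xs) := by
  induction xs with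
  | nil => intro acc buf; simp
  | cons x xs ih =>
    intro acc buf
    have hne : ¬ (((buf ++ [x]).length : Nat) : Int) = num_per := by
      simp only [List.length_append, List.length_cons, List.length_nil]; push_cast; omega
    have hstep : combineStep num_per (acc, buf) x = (acc, buf ++ [x]) := by
      unfold combineStep; simp only [if_neg hne]
    rw [List.foldl_cons, hstep, ih]; simp

-- A's loop never flushes while the buffer stays below size m+1
theorem loop_fill (m : Nat) (xs : List String) :
    ∀ acc buf, buf.length + xs.length ≤ m →
      xs.foldl (combineStep ((m : Int) + 1)) (acc, buf) = (acc, buf ++ xs) := by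
  induction xs with
  | nil => intro acc buf _; simp
  | cons x xs ih =>
    intro acc buf hlen
    simp only [List.length_cons] at hlen
    have hne : ¬ (((buf ++ [x]).length : Nat) : Int) = (m : Int) + 1 := by
      simp only [List.length_append, List.length_cons, List.length_nil]; push_cast; omega
    have hstep : combineStep ((m : Int) + 1) (acc, buf) x = (acc, buf ++ [x]) := by
      unfold combineStep; simp only [if_neg hne]
    have := ih acc (buf ++ [x]) (by simp only [List.length_append, List.length_cons, List.length_nil]; omega)
    rw [List.foldl_cons, hstep, this]; simp

-- A's loop flushes exactly when the buffer reaches size m+1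
theorem loop_flush (m : Nat) (ys : List String) :
    ∀ acc buf, buf.length + ys.length = m + 1 → ys ≠ [] →
      ys.foldl (combineStep ((m : Int) + 1)) (acc, buf) =
        (acc ++ [PySem.Str.join "\n" (buf ++ ys)], []) := by
  induction ys with
  | nil => intro _ _ _ h; exact absurd rfl h
  | cons y ys ih =>
    intro acc buf hlen _
    simp only [List.length_cons] at hlen
    by_cases hys : ys = []
    · subst hys
      have heq : (((buf ++ [y]).length : Nat) : Int) = (m : Int) + 1 := by
        simp only [List.length_append, List.length_cons, List.length_nil]
        simp only [List.length_nil] at hlen; push_cast; omega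
      simp only [List.foldl_cons, List.foldl_nil]
      unfold combineStep
      simp only [if_pos heq]
    · have hyslen : 1 ≤ ys.length := List.length_pos_iff.mpr hys
      have hne : ¬ (((buf ++ [y]).length : Nat) : Int) = (m : Int) + 1 := by
        simp only [List.length_append, List.length_cons, List.length_nil]; push_cast; omega
      have hstep : combineStep ((m : Int) + 1) (acc, buf) y = (acc, buf ++ [y]) := by
        unfold combineStep; simp only [if_neg hne]
      have := ih acc (buf ++ [y]) (by simp only [List.length_append, List.length_cons, List.length_nil]; omega) hys
      simp only [List.foldl_cons, hstep, this, List.append_assoc, List.cons_append,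
        List.nil_append]

-- A equals the reference chunking for positive num_per
theorem a_eq_chunks (m : Nat) (cmds : List String) :
    combine_cmds cmds ((m : Int) + 1) = chunksRec m cmds := by
  induction hL : cmds.length using Nat.strong_induction_on generalizing cmds with
  | _ L ih =>
  match cmds with
  | [] => simp [combine_cmds, chunksRec_nil]
  | c :: cs =>
    by_cases hsmall : (c :: cs).length ≤ m
    · have hfill := loop_fill m (c :: cs) [] [] (by simpa using hsmall)
      have htake : (c :: cs).take (m + 1) = c :: cs :=
        List.take_of_length_le (by omega)
      have hdrop : cs.drop m = [] := by
        apply List.drop_eq_nil_of_le; simp at hsmall; omega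
      rw [chunksRec_cons, htake, hdrop, chunksRec_nil]
      simp [combine_cmds, hfill]
    · -- at least one full chunk
      have hlen : m + 1 ≤ (c :: cs).length := by omega
      have hsplit : (c :: cs) = (c :: cs).take (m + 1) ++ (c :: cs).drop (m + 1) :=
        (List.take_append_drop _ _).symm
      have hflush := loop_flush m ((c :: cs).take (m + 1)) [] []
        (by
          have h3 : m + 1 ≤ cs.length + 1 := by simpa using hlen
          simp only [List.length_nil, List.length_take, List.length_cons]
          omega) (by
          have h3 : m + 1 ≤ cs.length + 1 := by simpa using hlen
          intro h
          have h2 := congrArg List.length h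
          simp only [List.length_take, List.length_nil, List.length_cons] at h2
          omega)
      have hrest : combine_cmds ((c :: cs).drop (m + 1)) ((m : Int) + 1)
          = chunksRec m ((c :: cs).drop (m + 1)) := by
        apply ih ((c :: cs).drop (m + 1)).length ?_ _ rfl
        simp only [List.length_drop, List.length_cons] at hL ⊢
        omega
      have key : combine_cmds (c :: cs) ((m : Int) + 1)
          = PySem.Str.join "\n" ((c :: cs).take (m + 1))
              :: combine_cmds ((c :: cs).drop (m + 1)) ((m : Int) + 1) := by
        unfold combine_cmds
        conv_lhs => rw [hsplit]
        rw [List.foldl_append, hflush]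
        simp only [List.nil_append]
        -- remaining fold starts from (singleton acc, empty buffer)
        have shift : ∀ (zs : List String) (a : String),
            zs.foldl (combineStep ((m : Int) + 1)) ([a], []) =
              (fun p => (a :: p.1, p.2)) (zs.foldl (combineStep ((m : Int) + 1)) ([], [])) := by
          intro zs a
          have gen : ∀ (zs : List String) (acc buf : List String) (a : String),
              zs.foldl (combineStep ((m : Int) + 1)) (a :: acc, buf) =
                (fun p => (a :: p.1, p.2)) (zs.foldl (combineStep ((m : Int) + 1)) (acc, buf)) := by
            intro zs
            induction zs with
            | nil => intro acc buf a; rfl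
            | cons z zs ihz =>
              intro acc buf a
              simp only [List.foldl_cons]
              unfold combineStep
              by_cases h : ((buf ++ [z]).length : Int) = (m : Int) + 1
              · simp only [h, if_pos, List.cons_append]
                exact ihz _ _ _
              · simp only [if_neg h]
                exact ihz _ _ _
          exact gen zs [] [] a
        rw [shift]
        rcases h2 : ((c :: cs).drop (m + 1)).foldl (combineStep ((m : Int) + 1)) ([], []) with ⟨p1, p2⟩
        by_cases hp : p2.isEmpty <;> simp [hp]
      rw [key, hrest, chunksRec_cons, List.drop_succ_cons]


-- splitting off the first chunk index from a positive-step range starting at 0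
theorem pyRange_pos_shift (L s : Int) (hs : 0 < s) (hL : 0 < L) :
    PySem.List.pyRange 0 L s = 0 :: (PySem.List.pyRange 0 (L - s) s).map (· + s) := by
  rw [PySem.List.pyRange_of_pos _ _ hs, PySem.List.pyRange_of_pos _ _ hs]
  have hq0 : 0 ≤ (L - 1) / s := Int.ediv_nonneg (by omega) (by omega)
  have hN : (if (0:Int) < L then ((L - 0 + s - 1) / s).toNat else 0)
      = (if (0:Int) < L - s then ((L - s - 0 + s - 1) / s).toNat else 0) + 1 := by
    by_cases hb : (0:Int) < L - s
    · have : (L - 0 + s - 1) / s = (L - 1) / s + 1 := by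
        have := Int.add_mul_ediv_right (L - 1) 1 (show s ≠ 0 by omega)
        rw [show L - 0 + s - 1 = L - 1 + 1 * s by ring, this]
      rw [if_pos hL, if_pos hb, this]
      have : L - s - 0 + s - 1 = L - 1 := by ring
      rw [this]
      omega
    · have h1 : (L - 0 + s - 1) / s = 1 := by
        rw [show L - 0 + s - 1 = (L - 1) + 1 * s by ring,
          Int.add_mul_ediv_right _ _ (show s ≠ 0 by omega)]
        have : (L - 1) / s = 0 := Int.ediv_eq_zero_of_lt (by omega) (by omega)
        omega
      rw [if_pos hL, if_neg hb, h1]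
      decide
  rw [hN, List.range_succ_eq_map]
  simp only [List.map_cons, List.map_map, Nat.cast_zero, mul_zero, add_zero]
  exact congrArg (0 :: ·) (List.map_congr_left (fun k _ => by
    simp only [Function.comp_apply]; push_cast; ring))

-- B equals the reference chunking for positive num_per
theorem b_eq_chunks (m : Nat) (cmds : List String) :
    combine_cmds_alt cmds ((m : Int) + 1) = chunksRec m cmds := by
  have hs : (0:Int) < (m : Int) + 1 := by omega
  have hpos : ¬ ((m : Int) + 1 ≤ 0) := by omega
  induction hL : cmds.length using Nat.strong_induction_on generalizing cmds with
  | _ L ih =>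
  match cmds with
  | [] =>
    unfold combine_cmds_alt
    rw [if_neg hpos, PySem.List.pyRange_of_pos _ _ hs]
    simp [chunksRec_nil]
  | c :: cs =>
    have hL0 : (0:Int) < (((c :: cs).length : Nat) : Int) := by
      simp only [List.length_cons]; push_cast; omega
    unfold combine_cmds_alt
    rw [if_neg hpos, pyRange_pos_shift _ _ hs hL0]
    simp only [List.map_cons, List.map_map]
    rw [chunksRec_cons]
    congr 1
    · -- head: slice from 0 of length m+1 is take (m+1)
      rw [zero_add, PySem.List.slice_zero_start, PySem.List.slice_to _ (by omega : (0:Int) ≤ (m : Int) + 1)]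
      congr 2
    · -- tail: shift the slices onto the dropped list, then apply the IH
      have hstep : ∀ i ∈ PySem.List.pyRange 0 ((((c :: cs).length : Nat) : Int) - ((m : Int) + 1)) ((m : Int) + 1),
          ((fun i => PySem.Str.join "\n" (PySem.List.slice (c :: cs) (some i) (some (i + ((m : Int) + 1))))) ∘ (· + ((m : Int) + 1))) i
            = PySem.Str.join "\n" (PySem.List.slice (cs.drop m) (some i) (some (i + ((m : Int) + 1)))) := by
        intro i hi
        have hi0 : 0 ≤ i := ((PySem.List.mem_pyRange_iff_of_pos hs i).mp hi).1
        simp only [Function.comp_apply]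
        congr 1
        rw [PySem.List.slice_toNat _ (by omega) (by omega),
            PySem.List.slice_toNat _ (by omega) (by omega)]
        rw [show cs.drop m = (c :: cs).drop (m + 1) from List.drop_succ_cons.symm,
            List.drop_drop]
        congr 1
        · omega
        · congr 1
          omega
      rw [List.map_congr_left hstep]
      have hrange : PySem.List.pyRange 0 ((((c :: cs).length : Nat) : Int) - ((m : Int) + 1)) ((m : Int) + 1)
          = PySem.List.pyRange 0 (((cs.drop m).length : Nat) : Int) ((m : Int) + 1) := by
        by_cases hcase : m ≤ cs.length
        · congr 1
          simp only [List.length_drop, List.length_cons]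
          push_cast [Nat.cast_sub hcase]
          ring
        · rw [Nat.not_le] at hcase
          rw [PySem.List.pyRange_of_pos _ _ hs, PySem.List.pyRange_of_pos _ _ hs]
          have hd : (cs.drop m).length = 0 := by
            simp only [List.length_drop]; omega
          rw [if_neg (by simp only [List.length_cons]; push_cast; omega),
              if_neg (by rw [hd]; simp)]
      rw [hrange]
      have hlt : (cs.drop m).length < L := by
        simp only [List.length_drop] at hL ⊢
        simp only [List.length_cons] at hL
        omega
      have := ih ((cs.drop m).length) hlt (cs.drop m) rfl
      unfold combine_cmds_alt at this
      rw [if_neg hpos] at this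
      exact this

-- ===== VERDICT (by name: the statement is the Claim_ definition above) =====
theorem combine_cmds_spec : Claim_equal_combine_cmds := by
  intro cmds num_per _
  unfold Spec_combine_cmds
  by_cases h : num_per ≤ 0
  · -- A never flushes; B's guard branch
    have := loop_nonpos num_per h cmds [] []
    unfold combine_cmds combine_cmds_alt
    simp only [this, if_pos h]
    cases cmds <;> simp
  · obtain ⟨m, hm⟩ : ∃ m : Nat, num_per = (m : Int) + 1 :=
      ⟨(num_per - 1).toNat, by omega⟩
    rw [hm, a_eq_chunks, b_eq_chunks]
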